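-- pv_equiv track=rewrite | github.com/DiversioTeam/ClassQuiz | scripts/validate_quiz_markdown.py | iter_questions
-- ===== SOURCE A (Python) =====
-- from typing import Iterable
--
-- def iter_questions(lines: list[str]) -> Iterable[tuple[int, list[str]]]:
--     """
--     Yield (start_index, block_lines) for each question-like block.
--
--     We treat '## ' headings as question boundaries and stop on '---'
--     slide separators.
--     """
--     n = len(lines)
--     i = 0
--     while i < n:
--         if lines[i].startswith("## "):
--             start = i
--             block: list[str] = [lines[i]]
--             i += 1
--             while i < n and not lines[i].startswith("## "):
--                 if lines[i].strip() == "---":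
--                     break
--                 block.append(lines[i])
--                 i += 1
--             yield start, block
--         else:
--             i += 1
-- ===== SOURCE B (Python) =====
-- def iter_questions(lines):
--     """Index-table first: collect heading positions, then extend each block."""
--     heads = [i for i, line in enumerate(lines) if line.startswith("## ")]
--     for h in heads:
--         block = [lines[h]]
--         for line in lines[h + 1:]:
--             if line.startswith("## ") or line.strip() == "---":
--                 break
--             block.append(line)
--         yield h, block
-- ===== Notes on version B (the rewrite author's own statement) =====
-- stated objective: alternative
-- what changed: Replaces A's single stateful while-loop scan (nested inner loop sharing the index i) with a two-phase decomposition: one pass collects all heading indices, then each block is extended independently from its heading by slicing.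
import Mathlib
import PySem

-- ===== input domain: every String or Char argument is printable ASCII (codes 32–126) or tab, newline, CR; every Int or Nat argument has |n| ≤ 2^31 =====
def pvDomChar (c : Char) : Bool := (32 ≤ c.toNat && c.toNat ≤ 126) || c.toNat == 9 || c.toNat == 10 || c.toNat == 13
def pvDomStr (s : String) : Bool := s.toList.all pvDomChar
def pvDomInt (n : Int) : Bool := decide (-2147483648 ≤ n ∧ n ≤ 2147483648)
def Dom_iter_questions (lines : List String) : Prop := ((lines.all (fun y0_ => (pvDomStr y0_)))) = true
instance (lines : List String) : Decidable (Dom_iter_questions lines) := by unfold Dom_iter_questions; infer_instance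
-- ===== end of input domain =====

-- B replaces A's single stateful index scan by a heading-index table plus per-heading block extension; same values, alternative decomposition.

-- ===== PORT A =====
-- inner while loop of A: consumes lines into block until end / next heading / '---' separator;
-- returns (remaining lines, current index i, block)
def pvInnerA : List String → Int → List String → (List String × Int × List String)
  | [], i, block => ([], i, block)
  | l :: rest, i, block =>
    if PySem.Str.startswith l "## " then (l :: rest, i, block)
    else if PySem.Str.strip l = "---" then (l :: rest, i, block)
    else pvInnerA rest (i + 1) (block ++ [l])

theorem pvInnerA_len : ∀ (ls : List String) (i : Int) (b : List String),
    (pvInnerA ls i b).1.length ≤ ls.length := by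
  intro ls
  induction ls with
  | nil => intro i b; simp [pvInnerA]
  | cons l rest ih =>
    intro i b
    simp only [pvInnerA]
    split
    · simp
    · split
      · simp
      · exact le_trans (ih _ _) (by simp)

-- outer while loop of A over (remaining lines, index i)
def pvOuterA : List String → Int → List (Int × List String)
  | [], _ => []
  | l :: rest, i =>
    if PySem.Str.startswith l "## " then
      let r := pvInnerA rest (i + 1) [l]
      (i, r.2.2) :: pvOuterA r.1 r.2.1
    else pvOuterA rest (i + 1)
termination_by ls _ => ls.length
decreasing_by
  · exact Nat.lt_succ_of_le (pvInnerA_len rest (i + 1) [l])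
  · simp

def iter_questions (lines : List String) : List (Int × List String) :=
  pvOuterA lines 0

-- ===== PORT B =====
-- the inner 'for line in lines[h+1:]: if …: break; block.append(line)' loop of B
def pvTakeBlock : List String → List String
  | [] => []
  | l :: rest =>
    if PySem.Str.startswith l "## " || PySem.Str.strip l == "---" then []
    else l :: pvTakeBlock rest

def iter_questions_alt (lines : List String) : List (Int × List String) :=
  let heads := (PySem.List.enumerate lines).filter (fun p => PySem.Str.startswith p.2 "## ")
  heads.map (fun p => (p.1, p.2 :: pvTakeBlock (PySem.List.slice lines (some (p.1 + 1)) none)))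

-- ===== PRECONDITION & SPEC =====
def Spec_iter_questions (lines : List String) (out : List (Int × List String)) : Prop := out = iter_questions_alt lines
instance (lines : List String) (out : List (Int × List String)) : Decidable (Spec_iter_questions lines out) := by unfold Spec_iter_questions; infer_instance

-- ===== CLAIM (what is proved, stated in full; the proofs are below) =====
def Claim_equal_iter_questions : Prop := ∀ (lines : List String), Dom_iter_questions lines → Spec_iter_questions lines (iter_questions lines)

-- ===== LEMMAS AND PROOFS =====

-- common reference form: one uniform line-by-line recursion
def pvF : List String → Int → List (Int × List String)
  | [], _ => []
  | l :: rest, i =>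
    if PySem.Str.startswith l "## " then (i, l :: pvTakeBlock rest) :: pvF rest (i + 1)
    else pvF rest (i + 1)

theorem pvInnerA_eq : ∀ (ls : List String) (i : Int) (b : List String),
    pvInnerA ls i b =
      (ls.drop (pvTakeBlock ls).length, i + (pvTakeBlock ls).length, b ++ pvTakeBlock ls) := by
  intro ls
  induction ls with
  | nil => intro i b; simp [pvInnerA, pvTakeBlock]
  | cons l rest ih =>
    intro i b
    by_cases h1 : PySem.Str.startswith l "## "
    · have hc : (PySem.Str.startswith l "## " || PySem.Str.strip l == "---") = true := by
        simp only [h1, Bool.true_or]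
      simp only [pvInnerA, pvTakeBlock, if_pos h1, if_pos hc]
      simp
    · by_cases h2 : PySem.Str.strip l = "---"
      · have hc : (PySem.Str.startswith l "## " || PySem.Str.strip l == "---") = true := by
          rw [h2]; simp
        simp only [pvInnerA, pvTakeBlock, if_neg h1, if_pos h2, if_pos hc]
        simp
      · have hc : ¬ (PySem.Str.startswith l "## " || PySem.Str.strip l == "---") = true := by
          simp only [Bool.or_eq_true, beq_iff_eq]
          exact not_or.mpr ⟨h1, h2⟩
        simp only [pvInnerA, pvTakeBlock, if_neg h1, if_neg h2, if_neg hc, ih,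
          List.length_cons, List.drop_succ_cons, Prod.mk.injEq]
        refine ⟨trivial, by push_cast; ring, by simp⟩

theorem pvTakeBlock_no_head : ∀ (ls : List String), ∀ l ∈ pvTakeBlock ls,
    PySem.Str.startswith l "## " = false := by
  intro ls
  induction ls with
  | nil => simp [pvTakeBlock]
  | cons l rest ih =>
    by_cases hc : (PySem.Str.startswith l "## " || PySem.Str.strip l == "---") = true
    · simp only [pvTakeBlock, if_pos hc]
      simp
    · simp only [pvTakeBlock, if_neg hc]
      intro x hx
      rcases List.mem_cons.mp hx with rfl | hx
      · simp only [Bool.or_eq_true, not_or] at hc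
        exact Bool.eq_false_iff.mpr hc.1
      · exact ih x hx

theorem pvTakeBlock_append_drop : ∀ (ls : List String),
    pvTakeBlock ls ++ ls.drop (pvTakeBlock ls).length = ls := by
  intro ls
  induction ls with
  | nil => simp [pvTakeBlock]
  | cons l rest ih =>
    simp only [pvTakeBlock]
    split
    · simp
    · simpa using ih

theorem pvF_skip : ∀ (t r : List String) (j : Int),
    (∀ l ∈ t, PySem.Str.startswith l "## " = false) →
    pvF (t ++ r) j = pvF r (j + t.length) := by
  intro t
  induction t with
  | nil => intro r j _; simp
  | cons l rest ih =>
    intro r j h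
    have hl := h l (List.mem_cons_self ..)
    simp only [List.cons_append, pvF, hl, Bool.false_eq_true, if_false]
    rw [ih r (j + 1) (fun x hx => h x (List.mem_cons_of_mem _ hx))]
    congr 1
    simp only [List.length_cons]
    push_cast; ring

theorem pvOuterA_eq_pvF : ∀ (n : Nat) (ls : List String) (i : Int), ls.length ≤ n →
    pvOuterA ls i = pvF ls i := by
  intro n
  induction n with
  | zero =>
    intro ls i h
    have : ls = [] := List.eq_nil_of_length_eq_zero (Nat.le_zero.mp h)
    subst this; simp [pvOuterA, pvF]
  | succ n ih =>
    intro ls i h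
    cases ls with
    | nil => simp [pvOuterA, pvF]
    | cons l rest =>
      have hrest : rest.length ≤ n := by simpa using Nat.le_of_succ_le_succ (by simpa using h)
      by_cases hl : PySem.Str.startswith l "## "
      · simp only [pvOuterA, pvF, hl, if_true]
        rw [pvInnerA_eq]
        simp only [List.cons_append, List.nil_append]
        congr 1
        have hb : (rest.drop (pvTakeBlock rest).length).length ≤ n := by
          rw [List.length_drop]; omega
        rw [ih _ _ hb]
        conv_rhs => rw [← pvTakeBlock_append_drop rest]
        rw [pvF_skip _ _ _ (pvTakeBlock_no_head rest)]
      · simp only [pvOuterA, pvF, hl, Bool.false_eq_true, if_false]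
        exact ih _ _ hrest

theorem pvAlt_eq_pvF : ∀ (ls full : List String) (i : Nat), full.drop i = ls →
    ((PySem.List.enumerate ls (i : Int)).filter (fun p => PySem.Str.startswith p.2 "## ")).map
      (fun p => (p.1, p.2 :: pvTakeBlock (PySem.List.slice full (some (p.1 + 1)) none)))
    = pvF ls (i : Int) := by
  intro ls
  induction ls with
  | nil => intro full i _; simp [PySem.List.enumerate_nil, pvF]
  | cons l rest ih =>
    intro full i hdrop
    have hdrop1 : full.drop (i + 1) = rest := by
      have h1 : (full.drop i).drop 1 = rest := by rw [hdrop]; rfl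
      rwa [List.drop_drop] at h1
    have hcast : (i : Int) + 1 = ((i + 1 : Nat) : Int) := by push_cast; ring
    by_cases hl : PySem.Str.startswith l "## "
    · simp only [PySem.List.enumerate_cons, List.filter_cons, hl, if_true, List.map_cons, pvF]
      congr 1
      · rw [hcast, PySem.List.slice_from_natCast, hdrop1]
      · rw [hcast]
        exact ih full (i + 1) hdrop1
    · simp only [PySem.List.enumerate_cons, List.filter_cons, hl, Bool.false_eq_true, if_false, pvF]
      rw [hcast]
      exact ih full (i + 1) hdrop1

-- ===== VERDICT (by name: the statement is the Claim_ definition above) =====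
theorem iter_questions_spec : Claim_equal_iter_questions := by
  intro lines _
  show iter_questions lines = iter_questions_alt lines
  rw [iter_questions, iter_questions_alt]
  rw [pvOuterA_eq_pvF lines.length lines 0 le_rfl]
  have := pvAlt_eq_pvF lines lines 0 (by simp)
  simpa using this.symm
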